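-- pv_equiv track=rewrite | github.com/fanboybp/Khai_Ngu | bai12.py | start_of_longest_positive_sequence
-- ===== SOURCE A (Python) =====
-- def start_of_longest_positive_sequence(lst):
--     vtrimax = -1  # Vị trí bắt đầu của đoạn số dương liên tiếp có nhiều phần tử nhất
--     maxdem = 0  # Số lượng các số dương liên tiếp có nhiều nhất
--     vitrihientai = -1  # Vị trí bắt đầu của đoạn số dương liên tiếp hiện tại
--     dem = 0  # Số lượng các số dương liên tiếp hiện tại
--
--     for i, num in enumerate(lst):
--         if num > 0:
--             if dem == 0:  # Nếu đây là phần tử đầu tiên trong đoạn số dương liên tiếp mới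
--                 vitrihientai = i
--             dem += 1
--             if dem > maxdem:
--                 maxdem = dem
--                 vtrimax = vitrihientai
--         else:
--             dem = 0  # Đặt lại số lượng khi gặp số không dương
--
--     return vtrimax
-- ===== SOURCE B (Python) =====
-- def start_of_longest_positive_sequence(lst):
--     # Segment the list into maximal runs of positives, then pick the first longest run.
--     runs = []
--     i = 0
--     n = len(lst)
--     while i < n:
--         if lst[i] > 0:
--             j = i
--             while j < n and lst[j] > 0:
--                 j += 1
--             runs.append((i, j - i))
--             i = j
--         else:
--             i += 1
--     best, best_len = -1, 0
--     for s, l in runs: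
--         if l > best_len:
--             best, best_len = s, l
--     return best
-- ===== Notes on version B (the rewrite author's own statement) =====
-- stated objective: alternative
-- what changed: Replaces A's single pass with an inline running counter and rolling maximum by a two-phase shape: first segment the list into (start, length) pairs of maximal positive runs, then select the first longest run.
import Mathlib
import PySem

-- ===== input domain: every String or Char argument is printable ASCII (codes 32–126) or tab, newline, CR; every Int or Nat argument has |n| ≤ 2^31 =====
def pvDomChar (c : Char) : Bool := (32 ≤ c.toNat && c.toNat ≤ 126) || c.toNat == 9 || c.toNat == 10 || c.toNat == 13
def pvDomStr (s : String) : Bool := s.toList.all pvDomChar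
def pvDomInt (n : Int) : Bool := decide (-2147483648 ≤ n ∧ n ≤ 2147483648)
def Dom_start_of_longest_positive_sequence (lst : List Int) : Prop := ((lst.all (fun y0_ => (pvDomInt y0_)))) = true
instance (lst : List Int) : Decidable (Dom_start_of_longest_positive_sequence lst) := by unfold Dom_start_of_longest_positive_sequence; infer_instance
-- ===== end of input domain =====

-- B replaces A's inline running-counter scan by segment-into-runs then select-first-longest (alternative decomposition, same cost).


-- ===== PORT A =====
-- A's for-loop over enumerate(lst) with state (vtrimax, maxdem, vitrihientai, dem); i is the enumerate index.
def loopA : List Int → Int → Int → Int → Int → Int → Int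
  | [], _, vtrimax, _, _, _ => vtrimax
  | num :: rest, i, vtrimax, maxdem, vitrihientai, dem =>
    if num > 0 then
      let vitrihientai' := if dem == 0 then i else vitrihientai
      let dem' := dem + 1
      if dem' > maxdem then
        loopA rest (i + 1) vitrihientai' dem' vitrihientai' dem'
      else
        loopA rest (i + 1) vtrimax maxdem vitrihientai' dem'
    else
      loopA rest (i + 1) vtrimax maxdem vitrihientai 0

def start_of_longest_positive_sequence (lst : List Int) : Int :=
  loopA lst 0 (-1) 0 (-1) 0

-- ===== PORT B =====
-- B phase 1: the outer while on index i; the inner while that advances j over positives is the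
-- takeWhile/dropWhile pair (j - i = length of the positive prefix).
def runsB : List Int → Int → List (Int × Int)
  | [], _ => []
  | x :: xs, i =>
    if x > 0 then
      let t := xs.takeWhile (fun y => decide (y > 0))
      (i, 1 + (t.length : Int)) :: runsB (xs.dropWhile (fun y => decide (y > 0))) (i + 1 + (t.length : Int))
    else
      runsB xs (i + 1)
termination_by l _ => l.length
decreasing_by
  · simpa using Nat.lt_succ_of_le (List.length_dropWhile_le _ _)
  · simp

-- B phase 2: select the first longest run.
def selB (st : Int × Int) (r : Int × Int) : Int × Int :=
  if r.2 > st.2 then r else st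

def start_of_longest_positive_sequence_alt (lst : List Int) : Int :=
  ((runsB lst 0).foldl selB (-1, 0)).1

-- ===== PRECONDITION & SPEC =====
def Spec_start_of_longest_positive_sequence (lst : List Int) (out : Int) : Prop := out = start_of_longest_positive_sequence_alt lst
instance (lst : List Int) (out : Int) : Decidable (Spec_start_of_longest_positive_sequence lst out) := by unfold Spec_start_of_longest_positive_sequence; infer_instance

-- ===== CLAIM (what is proved, stated in full; the proofs are below) =====
def Claim_equal_start_of_longest_positive_sequence : Prop := ∀ (lst : List Int), Dom_start_of_longest_positive_sequence lst → Spec_start_of_longest_positive_sequence lst (start_of_longest_positive_sequence lst)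

-- ===== LEMMAS AND PROOFS =====

-- The run list still ahead of A's loop when its current positive run has length dem starting at
-- vitrihientai: if dem > 0 and the list continues positively, the first run extends the pending one.
def mergedRuns (xs : List Int) (i vitrihientai dem : Int) : List (Int × Int) :=
  match xs with
  | [] => []
  | x :: ys =>
    if x > 0 ∧ dem > 0 then
      (vitrihientai, dem + 1 + ((ys.takeWhile (fun y => decide (y > 0))).length : Int)) ::
        runsB (ys.dropWhile (fun y => decide (y > 0))) (i + 1 + ((ys.takeWhile (fun y => decide (y > 0))).length : Int))
    else
      runsB (x :: ys) i

theorem selB_absorb (st : Int × Int) (v a b : Int) (h : a ≤ b) :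
    selB (selB st (v, a)) (v, b) = selB st (v, b) := by
  unfold selB; dsimp only
  split_ifs with h1 h2 h2 <;> simp_all <;> omega

theorem mergedRuns_zero (xs : List Int) (i vc : Int) : mergedRuns xs i vc 0 = runsB xs i := by
  match xs with
  | [] => simp [mergedRuns, runsB]
  | x :: ys => simp only [mergedRuns]; rw [if_neg (by simp)]

theorem loopA_eq_fold (xs : List Int) :
    ∀ (i vtrimax maxdem vitrihientai dem : Int), 0 ≤ dem →
      loopA xs i vtrimax maxdem vitrihientai dem =
      ((mergedRuns xs i vitrihientai dem).foldl selB (vtrimax, maxdem)).1 := by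
  induction xs with
  | nil => intro i vt md vc d _; simp [loopA, mergedRuns]
  | cons x ys ih =>
    intro i vt md vc d hd
    by_cases hx : x > 0
    · -- A consumes one positive element; the IH applies with dem + 1 > 0.
      set vc' : Int := (if d == 0 then i else vc) with hvc'
      have hstep : loopA (x :: ys) i vt md vc d =
          loopA ys (i+1) (selB (vt, md) (vc', d+1)).1 (selB (vt, md) (vc', d+1)).2 vc' (d+1) := by
        simp only [loopA, if_pos hx, selB, hvc']
        split_ifs <;> rfl
      have hmr : mergedRuns (x :: ys) i vc d =
          (vc', d + 1 + ((ys.takeWhile (fun y => decide (y > 0))).length : Int)) ::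
            runsB (ys.dropWhile (fun y => decide (y > 0))) (i + 1 + ((ys.takeWhile (fun y => decide (y > 0))).length : Int)) := by
        by_cases hd0 : d = 0
        · subst hd0
          rw [mergedRuns_zero]
          simp only [runsB, if_pos hx, hvc']
          norm_num
        · have hdpos : d > 0 := by omega
          simp only [mergedRuns]
          rw [if_pos ⟨hx, hdpos⟩, hvc', if_neg (by simpa using hd0)]
      rw [hstep, ih _ _ _ _ _ (by omega), hmr, List.foldl_cons]
      cases ys with
      | nil =>
          simp [mergedRuns, runsB, selB]
      | cons y zs =>
          have hP : ((selB (vt, md) (vc', d + 1)).1, (selB (vt, md) (vc', d + 1)).2)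
              = selB (vt, md) (vc', d + 1) := rfl
          by_cases hy : y > 0
          · have hmr2 : mergedRuns (y :: zs) (i+1) vc' (d+1) =
                (vc', (d+1) + 1 + ((zs.takeWhile (fun y => decide (y > 0))).length : Int)) ::
                  runsB (zs.dropWhile (fun y => decide (y > 0))) ((i+1) + 1 + ((zs.takeWhile (fun y => decide (y > 0))).length : Int)) := by
              simp only [mergedRuns]
              rw [if_pos ⟨hy, by omega⟩]
            have htw : (y :: zs).takeWhile (fun y => decide (y > 0)) = y :: zs.takeWhile (fun y => decide (y > 0)) := by
              simp [hy]
            have hdw : (y :: zs).dropWhile (fun y => decide (y > 0)) = zs.dropWhile (fun y => decide (y > 0)) := by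
              simp [hy]
            rw [hmr2, List.foldl_cons, htw, hdw, hP,
              selB_absorb (vt, md) vc' (d+1) _ (by omega)]
            have e0 : (((y :: zs.takeWhile (fun y => decide (y > 0))).length : Int))
                = ((zs.takeWhile (fun y => decide (y > 0))).length : Int) + 1 := by
              simp [List.length_cons]
            rw [e0]
            have e1 : d + 1 + 1 + ((zs.takeWhile (fun y => decide (y > 0))).length : Int)
                = d + 1 + (((zs.takeWhile (fun y => decide (y > 0))).length : Int) + 1) := by ring
            have e2 : i + 1 + 1 + ((zs.takeWhile (fun y => decide (y > 0))).length : Int)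
                = i + 1 + (((zs.takeWhile (fun y => decide (y > 0))).length : Int) + 1) := by ring
            rw [e1, e2]
          · have hmr2 : mergedRuns (y :: zs) (i+1) vc' (d+1) = runsB (y :: zs) (i+1) := by
              simp only [mergedRuns]
              rw [if_neg (by tauto)]
            have htw : (y :: zs).takeWhile (fun y => decide (y > 0)) = [] := by
              simp [hy]
            have hdw : (y :: zs).dropWhile (fun y => decide (y > 0)) = y :: zs := by
              simp [hy]
            rw [hmr2, htw, hdw, hP]
            norm_num
    · -- non-positive head: A resets dem to 0; runsB skips the element.
      have h0 : loopA (x :: ys) i vt md vc d = loopA ys (i+1) vt md vc 0 := by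
        simp [loopA, hx]
      rw [h0, ih _ _ _ _ _ le_rfl, mergedRuns_zero]
      have h1 : mergedRuns (x :: ys) i vc d = runsB (x :: ys) i := by
        simp only [mergedRuns]
        rw [if_neg (by tauto)]
      rw [h1]
      simp only [runsB, if_neg hx]

-- ===== VERDICT (by name: the statement is the Claim_ definition above) =====
theorem start_of_longest_positive_sequence_spec : Claim_equal_start_of_longest_positive_sequence := by
  intro lst _
  unfold Spec_start_of_longest_positive_sequence start_of_longest_positive_sequence start_of_longest_positive_sequence_alt
  rw [loopA_eq_fold _ _ _ _ _ _ le_rfl, mergedRuns_zero]
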